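-- pv_equiv track=rewrite | github.com/lorenliu13/smart_hs_mekong_reservoirs | data_processing/grit/build_lake_graph_from_reaches.py | find_upstream_lakes
-- ===== SOURCE A (Python) =====
-- def find_upstream_lakes(
--     start_fids: list[int],
--     this_lake_reaches: set[int],
--     all_fid_to_up: dict,
--     reach_to_lake: dict,
-- ) -> set[int]:
--     """
--     BFS upstream from `start_fids` through plain river reaches until lake
--     reaches are found. Returns the set of upstream lake IDs.
--
--     Traversal stops as soon as it enters any lake reach (we record that lake
--     and do not traverse further into it — we only want the *nearest* upstream
--     lake, not its upstream lakes).
--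
--     `this_lake_reaches` is excluded from traversal so we don't loop back into
--     the current lake when exploring its own entry points.
--     """
--     upstream_lakes: set[int] = set()
--     visited: set[int] = set()
--     queue: list[int] = list(start_fids)
--     while queue:
--         fid = queue.pop()
--         if fid in visited or fid in this_lake_reaches:
--             continue
--         visited.add(fid)
--         lake = reach_to_lake.get(fid)
--         if lake is not None:
--             upstream_lakes.add(lake)
--             # Do NOT traverse further into this upstream lake
--         else:
--             # Plain river reach — keep following upstream
--             queue.extend(all_fid_to_up.get(fid, []))
--     return upstream_lakes
-- ===== SOURCE B (Python) =====
-- def find_upstream_lakes(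
--     start_fids: list[int],
--     this_lake_reaches: set[int],
--     all_fid_to_up: dict,
--     reach_to_lake: dict,
-- ) -> set[int]:
--     """Recursive depth-first search upstream from start_fids; records the
--     nearest upstream lake of each branch and does not traverse past it.
--
--     Iterating in reverse makes lakes be discovered in the same order as the
--     pop-from-the-end worklist version (invisible in the returned set)."""
--     upstream_lakes: set[int] = set()
--     visited: set[int] = set()
--
--     def visit(fid: int) -> None:
--         if fid in visited or fid in this_lake_reaches:
--             return
--         visited.add(fid)
--         lake = reach_to_lake.get(fid)
--         if lake is not None:
--             upstream_lakes.add(lake)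
--         else:
--             for up in reversed(all_fid_to_up.get(fid, [])):
--                 visit(up)
--
--     for fid in reversed(start_fids):
--         visit(fid)
--     return upstream_lakes
-- ===== Notes on version B (the rewrite author's own statement) =====
-- stated objective: alternative
-- what changed: Replaces the explicit pop-from-the-end worklist loop with a recursive depth-first visit helper closing over the visited/result sets (explicit stack vs recursion decomposition); the returned set is identical.
import Mathlib
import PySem

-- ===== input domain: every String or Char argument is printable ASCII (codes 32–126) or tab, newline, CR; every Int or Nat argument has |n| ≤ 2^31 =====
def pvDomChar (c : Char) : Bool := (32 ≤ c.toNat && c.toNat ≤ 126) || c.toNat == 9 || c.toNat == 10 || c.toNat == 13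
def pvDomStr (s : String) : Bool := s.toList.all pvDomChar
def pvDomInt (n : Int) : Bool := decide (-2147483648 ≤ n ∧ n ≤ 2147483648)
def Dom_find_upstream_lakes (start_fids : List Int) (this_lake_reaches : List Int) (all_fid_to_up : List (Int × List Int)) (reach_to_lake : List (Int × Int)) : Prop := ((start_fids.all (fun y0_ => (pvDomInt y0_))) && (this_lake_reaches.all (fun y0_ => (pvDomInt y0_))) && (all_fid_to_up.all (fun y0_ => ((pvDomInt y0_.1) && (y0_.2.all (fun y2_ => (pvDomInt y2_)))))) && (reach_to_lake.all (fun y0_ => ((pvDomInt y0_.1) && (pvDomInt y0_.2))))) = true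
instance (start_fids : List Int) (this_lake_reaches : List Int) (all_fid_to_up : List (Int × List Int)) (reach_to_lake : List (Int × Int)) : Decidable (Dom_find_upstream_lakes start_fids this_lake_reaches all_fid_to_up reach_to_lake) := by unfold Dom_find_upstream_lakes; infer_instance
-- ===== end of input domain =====

-- B replaces A's explicit pop-from-the-end worklist loop by a recursive depth-first
-- visit helper (explicit stack ↔ recursion decomposition); same cost, identical result set.

-- (K \ visited) after adding x: used by the termination measure of both ports
theorem pvToFinsetAdd (v : PySem.Set Int) (x : Int) :
    (PySem.Set.add v x).toFinset = insert x v.toFinset := by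
  by_cases h : x ∈ v
  · rw [PySem.Set.add_of_mem h, Finset.insert_eq_self.2 (List.mem_toFinset.2 h)]
  · rw [PySem.Set.add_of_not_mem h]
    simp [List.toFinset_append]

theorem pvCardAddLe (K : Finset Int) (v : PySem.Set Int) (x : Int) :
    (K \ (PySem.Set.add v x).toFinset).card ≤ (K \ v.toFinset).card := by
  rw [pvToFinsetAdd, Finset.sdiff_insert]
  exact Finset.card_le_card (Finset.erase_subset _ _)

theorem pvCardAddLt (K : Finset Int) (v : PySem.Set Int) (x : Int)
    (hK : x ∈ K) (hv : x ∉ v) :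
    (K \ (PySem.Set.add v x).toFinset).card < (K \ v.toFinset).card := by
  rw [pvToFinsetAdd, Finset.sdiff_insert]
  exact Finset.card_erase_lt_of_mem (Finset.mem_sdiff.2 ⟨hK, by simpa using hv⟩)

-- ===== PORT A =====
-- A pops from the END of `queue` ('queue.pop()'), so the port stores the queue
-- top-first (head = next element popped): the initial queue is start_fids.reverse and
-- 'queue.extend(ups)' puts ups.reverse in front of the rest — exactly Python's pop order.
def pyFindLoop (this_lake_reaches : List Int) (afu : PySem.Dict Int (List Int))
    (rtl : PySem.Dict Int Int) :
    List Int → PySem.Set Int → PySem.Set Int → PySem.Set Int × PySem.Set Int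
  | [], visited, lakes => (visited, lakes)
  | fid :: rest, visited, lakes =>
    if h : (PySem.Set.contains visited fid || PySem.Set.contains this_lake_reaches fid) = true then
      pyFindLoop this_lake_reaches afu rtl rest visited lakes
    else
      match rtl.get? fid with
      | some lake =>
          pyFindLoop this_lake_reaches afu rtl rest
            (PySem.Set.add visited fid) (PySem.Set.add lakes lake)
      | none =>
          pyFindLoop this_lake_reaches afu rtl
            ((afu.getD fid []).reverse ++ rest) (PySem.Set.add visited fid) lakes
  termination_by q visited _ => ((afu.keys.toFinset \ visited.toFinset).card, q.length)
  decreasing_by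
  · exact Prod.Lex.right _ (Nat.lt_succ_self _)
  · rcases Nat.lt_or_eq_of_le (pvCardAddLe afu.keys.toFinset visited fid) with hlt | heq
    · exact Prod.Lex.left _ _ hlt
    · rw [heq]; exact Prod.Lex.right _ (Nat.lt_succ_self _)
  · have hv : fid ∉ visited := by
      intro hm
      exact h (by simp [hm])
    by_cases hk : fid ∈ afu.keys
    · exact Prod.Lex.left _ _ (pvCardAddLt _ _ _ (List.mem_toFinset.2 hk) hv)
    · have hget : afu.getD fid [] = [] := by
        apply PySem.Dict.getD_of_not_contains
        rw [PySem.Dict.contains_eq_decide_mem_keys]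
        simp [hk]
      rcases Nat.lt_or_eq_of_le (pvCardAddLe afu.keys.toFinset visited fid) with hlt | heq
      · exact Prod.Lex.left _ _ hlt
      · rw [heq]; exact Prod.Lex.right _ (by simp [hget])

def find_upstream_lakes (start_fids : List Int) (this_lake_reaches : List Int) (all_fid_to_up : List (Int × List Int)) (reach_to_lake : List (Int × Int)) : List Int :=
  (pyFindLoop this_lake_reaches ⟨all_fid_to_up⟩ ⟨reach_to_lake⟩
    start_fids.reverse PySem.Set.empty PySem.Set.empty).2

-- ===== PORT B =====
-- altVisit is Source B's `visit`, altRun is its `for … in reversed(…): visit(…)` loop.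
-- The fuel argument only bounds the recursion DEPTH (it drops by 1 per nested visit);
-- the chosen fuel all_fid_to_up.length + 1 always exceeds the depth, which is at most
-- the number of distinct keys of all_fid_to_up + 1 (see pvAltRunEqPyFindLoop below).
mutual
def altVisit (tlr : List Int) (afu : PySem.Dict Int (List Int)) (rtl : PySem.Dict Int Int) :
    Nat → Int → PySem.Set Int × PySem.Set Int → PySem.Set Int × PySem.Set Int
  | 0, _, s => s  -- fuel guard, never reached
  | F + 1, fid, (visited, lakes) =>
    if (PySem.Set.contains visited fid || PySem.Set.contains tlr fid) = true then
      (visited, lakes)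
    else
      match rtl.get? fid with
      | some lake => (PySem.Set.add visited fid, PySem.Set.add lakes lake)
      | none => altRun tlr afu rtl F (afu.getD fid []).reverse (PySem.Set.add visited fid, lakes)
  termination_by F _ _ => (F, 0)
  decreasing_by exact Prod.Lex.left _ _ (Nat.lt_succ_self _)

def altRun (tlr : List Int) (afu : PySem.Dict Int (List Int)) (rtl : PySem.Dict Int Int) :
    Nat → List Int → PySem.Set Int × PySem.Set Int → PySem.Set Int × PySem.Set Int
  | _, [], s => s
  | F, fid :: rest, s => altRun tlr afu rtl F rest (altVisit tlr afu rtl F fid s)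
  termination_by F l _ => (F, l.length + 1)
  decreasing_by
  · exact Prod.Lex.right _ (by simp)
  · exact Prod.Lex.right _ (by simp)
end

def find_upstream_lakes_alt (start_fids : List Int) (this_lake_reaches : List Int) (all_fid_to_up : List (Int × List Int)) (reach_to_lake : List (Int × Int)) : List Int :=
  (altRun this_lake_reaches ⟨all_fid_to_up⟩ ⟨reach_to_lake⟩
    (all_fid_to_up.length + 1) start_fids.reverse (PySem.Set.empty, PySem.Set.empty)).2

-- ===== PRECONDITION & SPEC =====
def Spec_find_upstream_lakes (start_fids : List Int) (this_lake_reaches : List Int) (all_fid_to_up : List (Int × List Int)) (reach_to_lake : List (Int × Int)) (out : List Int) : Prop := out = find_upstream_lakes_alt start_fids this_lake_reaches all_fid_to_up reach_to_lake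
instance (start_fids : List Int) (this_lake_reaches : List Int) (all_fid_to_up : List (Int × List Int)) (reach_to_lake : List (Int × Int)) (out : List Int) : Decidable (Spec_find_upstream_lakes start_fids this_lake_reaches all_fid_to_up reach_to_lake out) := by unfold Spec_find_upstream_lakes; infer_instance

-- ===== CLAIM (what is proved, stated in full; the proofs are below) =====
def Claim_equal_find_upstream_lakes : Prop := ∀ (start_fids : List Int) (this_lake_reaches : List Int) (all_fid_to_up : List (Int × List Int)) (reach_to_lake : List (Int × Int)), Dom_find_upstream_lakes start_fids this_lake_reaches all_fid_to_up reach_to_lake → Spec_find_upstream_lakes start_fids this_lake_reaches all_fid_to_up reach_to_lake (find_upstream_lakes start_fids this_lake_reaches all_fid_to_up reach_to_lake)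

-- ===== LEMMAS AND PROOFS =====

theorem pvCardAddEq (K : Finset Int) (v : PySem.Set Int) (x : Int) (hK : x ∉ K) :
    (K \ (PySem.Set.add v x).toFinset).card = (K \ v.toFinset).card := by
  rw [pvToFinsetAdd, Finset.sdiff_insert, Finset.erase_eq_self.2]
  intro h
  exact hK (Finset.mem_sdiff.1 h).1

-- step equations for the worklist loop (one per branch)
theorem pyFindLoop_cons_skip (tlr : List Int) (afu : PySem.Dict Int (List Int))
    (rtl : PySem.Dict Int Int) (fid : Int) (rest : List Int) (v l : PySem.Set Int)
    (hg : (PySem.Set.contains v fid || PySem.Set.contains tlr fid) = true) :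
    pyFindLoop tlr afu rtl (fid :: rest) v l = pyFindLoop tlr afu rtl rest v l := by
  rw [pyFindLoop.eq_def]
  simp only [dif_pos hg]

theorem pyFindLoop_cons_lake (tlr : List Int) (afu : PySem.Dict Int (List Int))
    (rtl : PySem.Dict Int Int) (fid : Int) (rest : List Int) (v l : PySem.Set Int) (lake : Int)
    (hg : (PySem.Set.contains v fid || PySem.Set.contains tlr fid) = false)
    (hlk : rtl.get? fid = some lake) :
    pyFindLoop tlr afu rtl (fid :: rest) v l =
      pyFindLoop tlr afu rtl rest (PySem.Set.add v fid) (PySem.Set.add l lake) := by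
  rw [pyFindLoop.eq_def]
  have hg' : ¬ (PySem.Set.contains v fid || PySem.Set.contains tlr fid) = true := by
    rw [hg]; simp
  simp only [dif_neg hg', hlk]

theorem pyFindLoop_cons_up (tlr : List Int) (afu : PySem.Dict Int (List Int))
    (rtl : PySem.Dict Int Int) (fid : Int) (rest : List Int) (v l : PySem.Set Int)
    (hg : (PySem.Set.contains v fid || PySem.Set.contains tlr fid) = false)
    (hlk : rtl.get? fid = none) :
    pyFindLoop tlr afu rtl (fid :: rest) v l =
      pyFindLoop tlr afu rtl ((afu.getD fid []).reverse ++ rest) (PySem.Set.add v fid) l := by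
  rw [pyFindLoop.eq_def]
  have hg' : ¬ (PySem.Set.contains v fid || PySem.Set.contains tlr fid) = true := by
    rw [hg]; simp
  simp only [dif_neg hg', hlk]

-- the stack loop splits over the queue: it finishes q1 (the top part) first
theorem pyFindLoop_append (tlr : List Int) (afu : PySem.Dict Int (List Int))
    (rtl : PySem.Dict Int Int) (q1 q2 : List Int) (v l : PySem.Set Int) :
    pyFindLoop tlr afu rtl (q1 ++ q2) v l =
      pyFindLoop tlr afu rtl q2 (pyFindLoop tlr afu rtl q1 v l).1
        (pyFindLoop tlr afu rtl q1 v l).2 := by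
  fun_induction pyFindLoop tlr afu rtl q1 v l with
  | case1 v l => simp
  | case2 fid rest v l h ih =>
      rw [List.cons_append, pyFindLoop_cons_skip _ _ _ _ _ _ _ h]
      exact ih
  | case3 fid rest v l h lake hlk ih =>
      rw [List.cons_append, pyFindLoop_cons_lake _ _ _ _ _ _ _ _ (by simpa using h) hlk]
      exact ih
  | case4 fid rest v l h hlk ih =>
      rw [List.cons_append, pyFindLoop_cons_up _ _ _ _ _ _ _ (by simpa using h) hlk,
        ← List.append_assoc]
      exact ih

-- the loop only ever adds to `visited`
theorem pyFindLoop_visited_mono (tlr : List Int) (afu : PySem.Dict Int (List Int))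
    (rtl : PySem.Dict Int Int) (q : List Int) (v l : PySem.Set Int) :
    ∀ x ∈ v, x ∈ (pyFindLoop tlr afu rtl q v l).1 := by
  fun_induction pyFindLoop tlr afu rtl q v l with
  | case1 v l => intro x hx; simpa using hx
  | case2 fid rest v l h ih => exact ih
  | case3 fid rest v l h lake hlk ih =>
      intro x hx
      exact ih x ((PySem.Set.mem_add _ _ _).2 (Or.inl hx))
  | case4 fid rest v l h hlk ih =>
      intro x hx
      exact ih x ((PySem.Set.mem_add _ _ _).2 (Or.inl hx))

-- step equations for B's recursion
theorem pyFindLoop_nil (tlr : List Int) (afu : PySem.Dict Int (List Int))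
    (rtl : PySem.Dict Int Int) (v l : PySem.Set Int) :
    pyFindLoop tlr afu rtl [] v l = (v, l) := by
  rw [pyFindLoop.eq_def]

theorem altRun_nil (tlr : List Int) (afu : PySem.Dict Int (List Int))
    (rtl : PySem.Dict Int Int) (F : Nat) (s : PySem.Set Int × PySem.Set Int) :
    altRun tlr afu rtl F [] s = s := by
  rw [altRun.eq_def]

theorem altRun_cons (tlr : List Int) (afu : PySem.Dict Int (List Int))
    (rtl : PySem.Dict Int Int) (F : Nat) (fid : Int) (rest : List Int)
    (s : PySem.Set Int × PySem.Set Int) :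
    altRun tlr afu rtl F (fid :: rest) s =
      altRun tlr afu rtl F rest (altVisit tlr afu rtl F fid s) := by
  rw [altRun.eq_def]

theorem altVisit_succ_skip (tlr : List Int) (afu : PySem.Dict Int (List Int))
    (rtl : PySem.Dict Int Int) (F : Nat) (fid : Int) (v l : PySem.Set Int)
    (hg : (PySem.Set.contains v fid || PySem.Set.contains tlr fid) = true) :
    altVisit tlr afu rtl (F + 1) fid (v, l) = (v, l) := by
  rw [altVisit.eq_def]
  simp only [if_pos hg]

theorem altVisit_succ_lake (tlr : List Int) (afu : PySem.Dict Int (List Int))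
    (rtl : PySem.Dict Int Int) (F : Nat) (fid : Int) (v l : PySem.Set Int) (lake : Int)
    (hg : (PySem.Set.contains v fid || PySem.Set.contains tlr fid) = false)
    (hlk : rtl.get? fid = some lake) :
    altVisit tlr afu rtl (F + 1) fid (v, l) =
      (PySem.Set.add v fid, PySem.Set.add l lake) := by
  rw [altVisit.eq_def]
  have hg' : ¬ (PySem.Set.contains v fid || PySem.Set.contains tlr fid) = true := by
    rw [hg]; simp
  simp only [if_neg hg', hlk]

theorem altVisit_succ_up (tlr : List Int) (afu : PySem.Dict Int (List Int))
    (rtl : PySem.Dict Int Int) (F : Nat) (fid : Int) (v l : PySem.Set Int)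
    (hg : (PySem.Set.contains v fid || PySem.Set.contains tlr fid) = false)
    (hlk : rtl.get? fid = none) :
    altVisit tlr afu rtl (F + 1) fid (v, l) =
      altRun tlr afu rtl F (afu.getD fid []).reverse (PySem.Set.add v fid, l) := by
  rw [altVisit.eq_def]
  have hg' : ¬ (PySem.Set.contains v fid || PySem.Set.contains tlr fid) = true := by
    rw [hg]; simp
  simp only [if_neg hg', hlk]

-- main lemma: with enough fuel, B's recursion computes A's loop state
theorem pvAltRunEqPyFindLoop (tlr : List Int) (afu : PySem.Dict Int (List Int))
    (rtl : PySem.Dict Int Int) :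
    ∀ (F : Nat) (q : List Int) (v l : PySem.Set Int),
      (afu.keys.toFinset \ v.toFinset).card + 1 ≤ F →
      altRun tlr afu rtl F q (v, l) = pyFindLoop tlr afu rtl q v l := by
  intro F
  induction F using Nat.strong_induction_on with
  | _ F ihF =>
  intro q
  induction q with
  | nil =>
    intro v l _
    rw [altRun_nil, pyFindLoop_nil]
  | cons fid rest ihq =>
    intro v l hF
    obtain ⟨F', rfl⟩ : ∃ F', F = F' + 1 := ⟨F - 1, by omega⟩
    rw [altRun_cons]
    by_cases hg : (PySem.Set.contains v fid || PySem.Set.contains tlr fid) = true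
    · rw [altVisit_succ_skip _ _ _ _ _ _ _ hg, pyFindLoop_cons_skip _ _ _ _ _ _ _ hg]
      exact ihq v l hF
    · have hgf : (PySem.Set.contains v fid || PySem.Set.contains tlr fid) = false := by
        simpa using hg
      have hv : fid ∉ v := by
        have h2 := hgf
        simp at h2
        exact h2.1
      cases hlk : rtl.get? fid with
      | some lake =>
        rw [altVisit_succ_lake _ _ _ _ _ _ _ _ hgf hlk,
          pyFindLoop_cons_lake _ _ _ _ _ _ _ _ hgf hlk]
        refine ihq _ _ ?_
        have := pvCardAddLe afu.keys.toFinset v fid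
        omega
      | none =>
        rw [altVisit_succ_up _ _ _ _ _ _ _ hgf hlk,
          pyFindLoop_cons_up _ _ _ _ _ _ _ hgf hlk]
        by_cases hk : fid ∈ afu.keys
        · have hlt := pvCardAddLt afu.keys.toFinset v fid (List.mem_toFinset.2 hk) hv
          rw [ihF F' (Nat.lt_succ_self F') (afu.getD fid []).reverse
            (PySem.Set.add v fid) l (by omega)]
          rw [pyFindLoop_append]
          have hmono : (afu.keys.toFinset \
              (pyFindLoop tlr afu rtl (afu.getD fid []).reverse
                (PySem.Set.add v fid) l).1.toFinset).card ≤
              (afu.keys.toFinset \ (PySem.Set.add v fid).toFinset).card := by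
            apply Finset.card_le_card
            apply Finset.sdiff_subset_sdiff (Finset.Subset.refl _)
            intro x hx
            exact List.mem_toFinset.2
              (pyFindLoop_visited_mono _ _ _ _ _ _ x (List.mem_toFinset.1 hx))
          have h2 := ihq (pyFindLoop tlr afu rtl (afu.getD fid []).reverse
            (PySem.Set.add v fid) l).1
            (pyFindLoop tlr afu rtl (afu.getD fid []).reverse (PySem.Set.add v fid) l).2
            (by omega)
          simpa using h2
        · have hget : afu.getD fid [] = [] := by
            apply PySem.Dict.getD_of_not_contains
            rw [PySem.Dict.contains_eq_decide_mem_keys]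
            simp [hk]
          rw [hget]
          simp only [List.reverse_nil, List.nil_append]
          rw [altRun_nil]
          refine ihq _ _ ?_
          have := pvCardAddEq afu.keys.toFinset v fid
            (fun hmem => hk (List.mem_toFinset.1 hmem))
          omega

-- ===== VERDICT (by name: the statement is the Claim_ definition above) =====
theorem find_upstream_lakes_spec : Claim_equal_find_upstream_lakes := by
  intro start_fids tlr afu rtl _
  unfold Spec_find_upstream_lakes find_upstream_lakes find_upstream_lakes_alt
  rw [pvAltRunEqPyFindLoop]
  have h : ((PySem.Dict.mk (κ := Int) (ν := List Int) afu).keys).toFinset.card ≤ afu.length := by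
    calc _ ≤ ((PySem.Dict.mk (κ := Int) (ν := List Int) afu).keys).length := List.toFinset_card_le _
    _ = afu.length := by simp [PySem.Dict.keys]
  simpa [PySem.Set.empty] using Nat.add_le_add_right h 1
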